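-- pv_equiv track=rewrite | github.com/VWatGIT/MtecThesis | Python_Skripts/widget_strucure.py | convert_to_drawio_xml
-- ===== SOURCE A (Python) =====
-- def convert_to_drawio_xml(widget_structure):
--     xml_header = '<?xml version="1.0" encoding="UTF-8"?>\n<mxfile host="app.diagrams.net">\n  <diagram name="Page-1">\n    <mxGraphModel dx="1000" dy="1000" grid="1" gridSize="10" guides="1" tooltips="1" connect="1" arrows="1" fold="1" page="1" pageScale="1" pageWidth="827" pageHeight="1169" math="0" shadow="0">\n      <root>\n        <mxCell id="0"/>\n        <mxCell id="1" parent="0"/>\n'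
--     xml_footer = '      </root>\n    </mxGraphModel>\n  </diagram>\n</mxfile>'
--     xml_content = ''
--     cell_id = 2
--     parent_id = 1
--     stack = [(parent_id, 0)]  # (parent_id, indent_level)
--
--     for line, indent in widget_structure:
--         while stack and stack[-1][1] >= indent:
--             stack.pop()
--         parent_id = stack[-1][0] if stack else 1
--         xml_content += f'        <mxCell id="{cell_id}" value="{line.strip()}" style="rounded=0;whiteSpace=wrap;html=1;" vertex="1" parent="{parent_id}">\n          <mxGeometry x="0" y="{indent * 40}" width="120" height="40" as="geometry"/>\n        </mxCell>\n'
--         stack.append((cell_id, indent))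
--         cell_id += 1
--
--     return xml_header + xml_content + xml_footer
-- ===== SOURCE B (Python) =====
-- def convert_to_drawio_xml(widget_structure):
--     xml_header = '<?xml version="1.0" encoding="UTF-8"?>\n<mxfile host="app.diagrams.net">\n  <diagram name="Page-1">\n    <mxGraphModel dx="1000" dy="1000" grid="1" gridSize="10" guides="1" tooltips="1" connect="1" arrows="1" fold="1" page="1" pageScale="1" pageWidth="827" pageHeight="1169" math="0" shadow="0">\n      <root>\n        <mxCell id="0"/>\n        <mxCell id="1" parent="0"/>\n'
--     xml_footer = '      </root>\n    </mxGraphModel>\n  </diagram>\n</mxfile>'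
--     indents = [indent for _, indent in widget_structure]
--
--     def parent_of(i):
--         # parent of item i is the most recent earlier item with a strictly
--         # smaller indent (root id 1 if there is none)
--         for j in range(i - 1, -1, -1):
--             if indents[j] < indents[i]:
--                 return j + 2
--         return 1
--
--     cells = [
--         f'        <mxCell id="{i + 2}" value="{line.strip()}" style="rounded=0;whiteSpace=wrap;html=1;" vertex="1" parent="{parent_of(i)}">\n          <mxGeometry x="0" y="{indent * 40}" width="120" height="40" as="geometry"/>\n        </mxCell>\n'
--         for i, (line, indent) in enumerate(widget_structure)
--     ]
--     return xml_header + ''.join(cells) + xml_footer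
-- ===== Notes on version B (the rewrite author's own statement) =====
-- stated objective: alternative
-- what changed: Replaces the mutable stack with pop/push bookkeeping by a stackless per-item rule: each cell's parent is the most recent earlier line with strictly smaller indent (found by a backward scan), cells are built as a list comprehension and joined once.
import Mathlib
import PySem

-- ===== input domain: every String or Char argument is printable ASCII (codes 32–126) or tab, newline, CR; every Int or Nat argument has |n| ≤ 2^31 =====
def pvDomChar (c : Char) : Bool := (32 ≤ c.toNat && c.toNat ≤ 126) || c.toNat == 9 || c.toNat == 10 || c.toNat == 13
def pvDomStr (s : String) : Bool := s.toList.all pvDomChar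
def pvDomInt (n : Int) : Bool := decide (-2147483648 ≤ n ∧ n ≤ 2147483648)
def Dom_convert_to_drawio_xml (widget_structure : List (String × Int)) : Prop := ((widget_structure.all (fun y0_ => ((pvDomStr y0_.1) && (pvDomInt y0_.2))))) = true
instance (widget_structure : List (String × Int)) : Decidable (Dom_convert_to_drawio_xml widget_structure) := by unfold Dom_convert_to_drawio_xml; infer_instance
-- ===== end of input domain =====

-- B replaces A's mutable pop/push stack by a stackless rule — each cell's parent is the
-- most recent earlier line with strictly smaller indent, found by a backward scan — and
-- joins the cells once; same output, proved equal (objective: alternative).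


def pvXmlHeader : String := "<?xml version=\"1.0\" encoding=\"UTF-8\"?>\n<mxfile host=\"app.diagrams.net\">\n  <diagram name=\"Page-1\">\n    <mxGraphModel dx=\"1000\" dy=\"1000\" grid=\"1\" gridSize=\"10\" guides=\"1\" tooltips=\"1\" connect=\"1\" arrows=\"1\" fold=\"1\" page=\"1\" pageScale=\"1\" pageWidth=\"827\" pageHeight=\"1169\" math=\"0\" shadow=\"0\">\n      <root>\n        <mxCell id=\"0\"/>\n        <mxCell id=\"1\" parent=\"0\"/>\n"

def pvXmlFooter : String := "      </root>\n    </mxGraphModel>\n  </diagram>\n</mxfile>"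

-- the f-string body, identical in A and B (id, line, indent, parent)
def pvCell (cid : Int) (line : String) (indent : Int) (pid : Int) : String :=
  "        <mxCell id=\"" ++ PySem.Int.toStr cid ++ "\" value=\"" ++ PySem.Str.strip line
    ++ "\" style=\"rounded=0;whiteSpace=wrap;html=1;\" vertex=\"1\" parent=\"" ++ PySem.Int.toStr pid
    ++ "\">\n          <mxGeometry x=\"0\" y=\"" ++ PySem.Int.toStr (indent * 40)
    ++ "\" width=\"120\" height=\"40\" as=\"geometry\"/>\n        </mxCell>\n"

-- ===== PORT A =====
-- the 'while stack and stack[-1][1] >= indent: stack.pop()' loop (stack top at head)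
def pvPopStk : List (Int × Int) → Int → List (Int × Int)
  | [], _ => []
  | (pid, d) :: rest, ind => if d ≥ ind then pvPopStk rest ind else (pid, d) :: rest

-- the for-loop over widget_structure, state = (xml_content, cell_id, stack)
def pvALoop : List (String × Int) → String → Int → List (Int × Int) → String
  | [], content, _, _ => content
  | (line, indent) :: rest, content, cid, stk =>
      let stk' := pvPopStk stk indent
      let pid : Int := match stk' with | [] => 1 | (p, _) :: _ => p
      pvALoop rest (content ++ pvCell cid line indent pid) (cid + 1) ((cid, indent) :: stk')

def convert_to_drawio_xml (widget_structure : List (String × Int)) : String :=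
  pvXmlHeader ++ pvALoop widget_structure "" 2 [(1, 0)] ++ pvXmlFooter

-- ===== PORT B =====
-- parent_of: the backward scan 'for j in range(i-1,-1,-1)' over the earlier
-- (index, indent) pairs, most recent first
def pvParentOf : List (Int × Int) → Int → Int
  | [], _ => 1
  | (j, d) :: rest, ind => if d < ind then j + 2 else pvParentOf rest ind

-- the comprehension: emit each cell, carrying the enumerated prefix (reversed) and i
def pvBLoop : List (String × Int) → List (Int × Int) → Int → String
  | [], _, _ => ""
  | (line, indent) :: rest, revPrev, i =>
      pvCell (i + 2) line indent (pvParentOf revPrev indent)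
        ++ pvBLoop rest ((i, indent) :: revPrev) (i + 1)

def convert_to_drawio_xml_alt (widget_structure : List (String × Int)) : String :=
  pvXmlHeader ++ pvBLoop widget_structure [] 0 ++ pvXmlFooter

-- ===== PRECONDITION & SPEC =====
def Spec_convert_to_drawio_xml (widget_structure : List (String × Int)) (out : String) : Prop := out = convert_to_drawio_xml_alt widget_structure
instance (widget_structure : List (String × Int)) (out : String) : Decidable (Spec_convert_to_drawio_xml widget_structure out) := by unfold Spec_convert_to_drawio_xml; infer_instance

-- ===== CLAIM (what is proved, stated in full; the proofs are below) =====
def Claim_equal_convert_to_drawio_xml : Prop := ∀ (widget_structure : List (String × Int)), Dom_convert_to_drawio_xml widget_structure → Spec_convert_to_drawio_xml widget_structure (convert_to_drawio_xml widget_structure)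

-- ===== LEMMAS AND PROOFS =====

-- parent id A reads from a stack after popping with indent `ind`
def pvPid (stk : List (Int × Int)) : Int := match stk with | [] => 1 | (p, _) :: _ => p

-- popping twice with a smaller-or-equal threshold collapses to one pop
theorem pvPop_pop (stk : List (Int × Int)) (d ind : Int) (h : ind ≤ d) :
    pvPopStk (pvPopStk stk d) ind = pvPopStk stk ind := by
  induction stk with
  | nil => rfl
  | cons x rest ih =>
    obtain ⟨p, e⟩ := x
    by_cases he : e ≥ d
    · have he' : e ≥ ind := le_trans h he
      simp [pvPopStk, he, he', ih]
    · have he' : ¬ d ≤ e := he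
      have hlt : e < d := lt_of_not_ge he
      simp [pvPopStk, he']

-- the stack/backward-scan invariant: both sides compute the same parent for any indent
theorem pvInv_step (stk : List (Int × Int)) (revPrev : List (Int × Int)) (i d : Int)
    (h : ∀ ind, pvPid (pvPopStk stk ind) = pvParentOf revPrev ind) :
    ∀ ind, pvPid (pvPopStk ((i + 2, d) :: pvPopStk stk d) ind)
      = pvParentOf ((i, d) :: revPrev) ind := by
  intro ind
  by_cases hd : d ≥ ind
  · have hnd : ¬ d < ind := not_lt_of_ge hd
    simp only [pvPopStk, if_pos hd, pvParentOf, if_neg hnd]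
    rw [pvPop_pop stk d ind hd]
    exact h ind
  · have hlt : d < ind := lt_of_not_ge hd
    simp [pvPopStk, hd, pvParentOf, hlt, pvPid]

-- main loop correspondence
theorem pvLoop_eq (ws : List (String × Int)) :
    ∀ (c : String) (i : Int) (stk revPrev : List (Int × Int)),
    (∀ ind, pvPid (pvPopStk stk ind) = pvParentOf revPrev ind) →
    pvALoop ws c (i + 2) stk = c ++ pvBLoop ws revPrev i := by
  induction ws with
  | nil => intro c i stk revPrev _; simp [pvALoop, pvBLoop, String.append_empty]
  | cons x rest ih =>
    intro c i stk revPrev h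
    obtain ⟨line, indent⟩ := x
    show pvALoop rest (c ++ pvCell (i + 2) line indent (pvPid (pvPopStk stk indent)))
        ((i + 2) + 1) ((i + 2, indent) :: pvPopStk stk indent)
      = c ++ pvBLoop ((line, indent) :: rest) revPrev i
    have step := pvInv_step stk revPrev i indent h
    have : (i + 2) + 1 = (i + 1) + 2 := by ring
    rw [this, ih (c ++ pvCell (i + 2) line indent (pvPid (pvPopStk stk indent)))
        (i + 1) ((i + 2, indent) :: pvPopStk stk indent) ((i, indent) :: revPrev) step]
    rw [h indent]
    simp [pvBLoop, String.append_assoc]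

-- ===== VERDICT (by name: the statement is the Claim_ definition above) =====
theorem convert_to_drawio_xml_spec : Claim_equal_convert_to_drawio_xml := by
  intro ws _
  unfold Spec_convert_to_drawio_xml convert_to_drawio_xml convert_to_drawio_xml_alt
  have h0 : ∀ ind, pvPid (pvPopStk [((1 : Int), (0 : Int))] ind) = pvParentOf [] ind := by
    intro ind
    by_cases h : (0 : Int) ≥ ind <;> simp [pvPopStk, h, pvPid, pvParentOf]
  have := pvLoop_eq ws "" 0 [(1, 0)] [] h0
  simp only [show (0 : Int) + 2 = 2 by norm_num] at this
  rw [this]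
  simp [String.append_assoc]
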